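-- pv_equiv track=rewrite | github.com/ckadelka/AttractorCoherence | utils.py | running_max
-- ===== SOURCE A (Python) =====
-- def running_max(data):
--     running_maxs = []
--     maximum = data[0]
--     for num in data:
--         if num>maximum:
--             maximum = num
--         running_maxs.append(maximum)
--     return running_maxs
-- ===== SOURCE B (Python) =====
-- def running_max(data):
--     if not data:
--         return []
--     return _rm(data)
--
-- def _rm(seg):
--     if len(seg) <= 1:
--         return seg[:]
--     mid = len(seg) // 2
--     left = _rm(seg[:mid])
--     m = left[-1]
--     return left + [x if x > m else m for x in _rm(seg[mid:])]
-- ===== Notes on version B (the rewrite author's own statement) =====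
-- stated objective: alternative
-- what changed: Replaces the single-pass accumulator loop by a divide-and-conquer recursion: compute the running max of each half independently, then lift the right half's running maxima by the left half's overall maximum.
import Mathlib
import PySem

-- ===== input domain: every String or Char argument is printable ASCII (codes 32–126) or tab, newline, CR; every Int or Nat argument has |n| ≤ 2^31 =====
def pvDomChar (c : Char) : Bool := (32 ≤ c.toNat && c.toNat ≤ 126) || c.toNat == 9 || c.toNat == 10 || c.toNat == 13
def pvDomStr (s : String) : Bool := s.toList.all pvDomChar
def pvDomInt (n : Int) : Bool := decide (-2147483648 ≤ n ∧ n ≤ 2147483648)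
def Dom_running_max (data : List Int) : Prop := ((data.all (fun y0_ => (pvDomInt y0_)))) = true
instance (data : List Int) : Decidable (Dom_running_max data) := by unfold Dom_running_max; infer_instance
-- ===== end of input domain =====

-- B replaces A's single-pass accumulator loop by a divide-and-conquer recursion (alternative algorithm).
-- ===== PORT A =====
-- loop body: if num > maximum then maximum := num; running_maxs.append(maximum)
def running_max_loop (maximum : Int) (acc : List Int) : List Int → List Int
  | [] => acc
  | num :: rest =>
      let maximum' := if num > maximum then num else maximum
      running_max_loop maximum' (acc ++ [maximum']) rest

def running_max (data : List Int) : List Int :=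
  match PySem.List.pyGet? data 0 with
  | none => []   -- data[0] raises IndexError on []; excluded by Pre_
  | some m0 => running_max_loop m0 [] data

-- ===== PORT B =====
-- _rm(seg): divide and conquer; left[-1] ported via pyGet? (left is always nonempty)
def running_max_rm (seg : List Int) : List Int :=
  if _h : seg.length ≤ 1 then seg
  else
    let mid := seg.length / 2
    let left := running_max_rm (seg.take mid)
    let m := (PySem.List.pyGet? left (-1)).getD 0
    left ++ (running_max_rm (seg.drop mid)).map (fun x => if x > m then x else m)
termination_by seg.length
decreasing_by
  · simp only [List.length_take]; omega
  · simp only [List.length_drop]; omega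

def running_max_alt (data : List Int) : List Int :=
  if data = [] then [] else running_max_rm data

-- ===== PRECONDITION & SPEC =====
-- Pre_ excludes the empty list, on which A raises IndexError.
def Pre_running_max (data : List Int) : Prop := data ≠ []
instance (data : List Int) : Decidable (Pre_running_max data) := by unfold Pre_running_max; infer_instance
def pvWitness_running_max : List Int := [3, 1, 4]

def Spec_running_max (data : List Int) (out : List Int) : Prop := out = running_max_alt data
instance (data : List Int) (out : List Int) : Decidable (Spec_running_max data out) := by unfold Spec_running_max; infer_instance

-- ===== CLAIM (what is proved, stated in full; the proofs are below) =====
def Claim_equal_running_max : Prop := ∀ (data : List Int), Dom_running_max data → Pre_running_max data → Spec_running_max data (running_max data)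

-- ===== LEMMAS AND PROOFS =====
-- pm m l : the running maxima of l with seed m (proof-only characterisation of both ports)
def pm (m : Int) : List Int → List Int
  | [] => []
  | x :: xs => let m' := max m x; m' :: pm m' xs

-- pmHead l : running maxima seeded by the head (the specified result on nonempty lists)
def pmHead : List Int → List Int
  | [] => []
  | x :: xs => x :: pm x xs

lemma running_max_loop_eq (m : Int) (acc : List Int) (l : List Int) :
    running_max_loop m acc l = acc ++ pm m l := by
  induction l generalizing m acc with
  | nil => simp [running_max_loop, pm]
  | cons x xs ih =>
      simp only [running_max_loop, pm, ih]
      have hmax : max m x = if x > m then x else m := by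
        rcases le_or_gt x m with h | h
        · simp [max_eq_left h, not_lt_of_ge h]
        · simp [max_eq_right (le_of_lt h), h]
      simp [hmax]

lemma pm_seed (xs : List Int) : ∀ m a : Int, pm (max m a) xs = (pm a xs).map (fun x => max m x) := by
  induction xs with
  | nil => intro m a; simp [pm]
  | cons b ys ih =>
      intro m a
      simp only [pm, List.map_cons]
      rw [max_assoc]
      exact congrArg _ (ih m (max a b))

lemma pm_append (xs : List Int) : ∀ (m : Int) (r : List Int),
    pm m (xs ++ r) = pm m xs ++ pm ((pm m xs).getLastD m) r := by
  induction xs with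
  | nil => intro m r; simp [pm]
  | cons a ys ih =>
      intro m r
      simp only [List.cons_append, pm, List.getLastD_cons]
      rw [ih]

lemma pmHead_append (l r : List Int) (hl : l ≠ []) :
    pmHead (l ++ r) = pmHead l ++ pm ((pmHead l).getLastD 0) r := by
  match l with
  | x :: xs =>
      simp only [List.cons_append, pmHead, List.getLastD_cons]
      rw [pm_append]

lemma pm_eq_map (m : Int) (r : List Int) :
    pm m r = (pmHead r).map (fun x => max m x) := by
  match r with
  | [] => simp [pm, pmHead]
  | a :: xs =>
      simp only [pm, pmHead, List.map_cons]
      exact congrArg _ (pm_seed xs m a)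

lemma max_fun_eq (m : Int) : (fun x : Int => if x > m then x else m) = (fun x => max m x) := by
  funext x
  rcases le_or_gt x m with h | h
  · simp [max_eq_left h, not_lt_of_ge h]
  · simp [max_eq_right (le_of_lt h), h]

lemma rm_eq_pmHead (seg : List Int) (hne : seg ≠ []) : running_max_rm seg = pmHead seg := by
  induction seg using running_max_rm.induct with
  | case1 seg h =>
      rw [running_max_rm]
      simp only [h, dite_true]
      match seg, hne with
      | [x], _ => simp [pmHead, pm]
  | case2 seg h mid ih1 ih2 =>
      have hlen : 2 ≤ seg.length := by omega
      have hmid1 : 1 ≤ mid := by omega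
      have hmidlt : mid < seg.length := by omega
      have htake : seg.take mid ≠ [] := by
        have hlt : (seg.take mid).length = mid := by
          simp [List.length_take]; omega
        intro hc; rw [hc] at hlt; simp at hlt; omega
      have hdrop : seg.drop mid ≠ [] := by
        have hld : (seg.drop mid).length = seg.length - mid := by
          simp
        intro hc; rw [hc] at hld; simp at hld; omega
      rw [running_max_rm]
      simp only [h, dite_false]
      rw [ih1 htake, ih2 hdrop]
      have hm : (PySem.List.pyGet? (pmHead (seg.take mid)) (-1)).getD 0
          = (pmHead (seg.take mid)).getLastD 0 := by
        rw [PySem.List.pyGet?_neg_one, List.getLastD_eq_getLast?]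
      rw [hm, max_fun_eq, ← pm_eq_map]
      rw [← pmHead_append _ _ htake, List.take_append_drop]

-- ===== VERDICT (by name: the statement is the Claim_ definition above) =====
theorem running_max_spec : Claim_equal_running_max := by
  intro data _ hpre
  match data, hpre with
  | x :: xs, _ =>
      show running_max (x :: xs) = running_max_alt (x :: xs)
      simp only [running_max, running_max_alt, PySem.List.pyGet?_zero_cons, if_neg (List.cons_ne_nil x xs)]
      rw [running_max_loop_eq, rm_eq_pmHead _ (List.cons_ne_nil x xs)]
      simp [pmHead, pm]
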